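-- pv_equiv track=rewrite | github.com/LorenzoCNR/AI_for_all | Contrastive_Stuff/EEG-ANN-Pipeline/helpers/eeg_utils.py | convert_labels_string_to_int
-- ===== SOURCE A (Python) =====
-- def convert_labels_string_to_int(labels):
--
--     # Data una lista di labels sotto in formato stringa le converte in intero
--     # e fornisce un dizionario per tornare indietro
--     labels_int_to_str = dict()
--     labels_str_to_int = dict()
--     labels_converted = []
--
--     for i, label in enumerate(labels):
--
--         # Controllo se ho già trovato questa label
--         if label not in labels_str_to_int:
--
--             # Aggiungo un elemento a entrambi i dizionari di conversione
--             new_label_int = len(labels_int_to_str)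
--             labels_str_to_int[label] = new_label_int
--             labels_int_to_str[new_label_int] = label
--
--         # La converto
--         label = labels_str_to_int[label]
--         labels_converted.append(label)
--
--     return labels_converted, labels_int_to_str
-- ===== SOURCE B (Python) =====
-- def convert_labels_string_to_int(labels):
--     # Dedupe first (first-appearance order), then build both mappings by
--     # enumeration and convert in a separate pass.
--     uniques = list(dict.fromkeys(labels))
--     labels_str_to_int = {s: i for i, s in enumerate(uniques)}
--     labels_int_to_str = {i: s for i, s in enumerate(uniques)}
--     labels_converted = [labels_str_to_int[label] for label in labels]
--     return labels_converted, labels_int_to_str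
-- ===== Notes on version B (the rewrite author's own statement) =====
-- stated objective: simpler
-- what changed: Replaces A's single interleaved loop that grows two dicts and the output together with a dedupe-then-enumerate decomposition: compute the ordered unique labels once, build both mapping dicts by enumeration, and convert the labels in a separate comprehension pass.
import Mathlib
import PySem

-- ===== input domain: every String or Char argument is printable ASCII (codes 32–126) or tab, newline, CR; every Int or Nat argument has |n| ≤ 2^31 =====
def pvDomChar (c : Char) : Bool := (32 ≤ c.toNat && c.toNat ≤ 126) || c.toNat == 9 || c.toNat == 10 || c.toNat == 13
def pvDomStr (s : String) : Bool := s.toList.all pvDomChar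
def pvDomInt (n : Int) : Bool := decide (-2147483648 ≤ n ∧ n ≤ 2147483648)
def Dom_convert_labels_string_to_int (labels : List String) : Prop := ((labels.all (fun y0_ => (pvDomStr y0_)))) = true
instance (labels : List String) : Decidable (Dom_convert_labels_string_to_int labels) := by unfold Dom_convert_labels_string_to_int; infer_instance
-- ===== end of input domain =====

-- B replaces A's single interleaved dict-growing loop with a dedupe-then-enumerate
-- decomposition (same O(n) cost, simpler); return values proved equal on all inputs.

-- ===== PORT A =====
-- One iteration of A's loop body (the state is (labels_int_to_str, labels_str_to_int, labels_converted)).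
def pvStepA (st : PySem.Dict Int String × PySem.Dict String Int × List Int)
    (p : Int × String) : PySem.Dict Int String × PySem.Dict String Int × List Int :=
  let label := p.2
  let ds : PySem.Dict Int String × PySem.Dict String Int :=
    if st.2.1.contains label = false then
      let newLabelInt : Int := (st.1.size : Int)
      (st.1.insert newLabelInt label, st.2.1.insert label newLabelInt)
    else (st.1, st.2.1)
  -- labels_str_to_int[label]: the key is always present at this point, so KeyError
  -- is impossible and getD 0 is exact.
  (ds.1, ds.2, st.2.2 ++ [ds.2.getD label 0])

def convert_labels_string_to_int (labels : List String) : List Int × (List (Int × String)) :=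
  let st := (PySem.List.enumerate labels).foldl pvStepA (PySem.Dict.empty, PySem.Dict.empty, [])
  (st.2.2, st.1.items)

-- ===== PORT B =====
def convert_labels_string_to_int_alt (labels : List String) : List Int × (List (Int × String)) :=
  let uniques := PySem.List.dedup labels
  let labels_str_to_int : PySem.Dict String Int :=
    PySem.Dict.ofList ((PySem.List.enumerate uniques).map (fun p => (p.2, p.1)))
  let labels_int_to_str : PySem.Dict Int String :=
    PySem.Dict.ofList (PySem.List.enumerate uniques)
  (labels.map (fun label => labels_str_to_int.getD label 0), labels_int_to_str.items)

-- ===== PRECONDITION & SPEC =====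
def Spec_convert_labels_string_to_int (labels : List String) (out : List Int × (List (Int × String))) : Prop := out = convert_labels_string_to_int_alt labels
instance (labels : List String) (out : List Int × (List (Int × String))) : Decidable (Spec_convert_labels_string_to_int labels out) := by unfold Spec_convert_labels_string_to_int; infer_instance

-- ===== CLAIM (what is proved, stated in full; the proofs are below) =====
def Claim_equal_convert_labels_string_to_int : Prop := ∀ (labels : List String), Dom_convert_labels_string_to_int labels → Spec_convert_labels_string_to_int labels (convert_labels_string_to_int labels)

-- ===== LEMMAS AND PROOFS =====

-- The int→str dict after processing a prefix with ordered uniques u.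
def mkI2S (u : List String) : PySem.Dict Int String := ⟨PySem.List.enumerate u⟩
-- The str→int dict after processing a prefix with ordered uniques u.
def mkS2I (u : List String) : PySem.Dict String Int :=
  ⟨(PySem.List.enumerate u).map (fun p => (p.2, p.1))⟩

theorem set_contains_mem (u : List String) (l : String) :
    PySem.Set.contains u l = decide (l ∈ u) := by
  simp [PySem.Set.contains]

theorem set_add_mem (u : List String) (l : String) (h : l ∈ u) :
    PySem.Set.add u l = u := by
  rw [PySem.Set.add, set_contains_mem]; simp [h]

theorem set_add_not_mem (u : List String) (l : String) (h : l ∉ u) :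
    PySem.Set.add u l = u ++ [l] := by
  rw [PySem.Set.add, set_contains_mem]; simp [h]

theorem any_snd_enumerate (u : List String) (l : String) : ∀ (s : Int),
    (PySem.List.enumerate u s).any (fun p => p.2 == l) = decide (l ∈ u) := by
  induction u with
  | nil => intro s; simp [PySem.List.enumerate_nil]
  | cons x xs ih =>
    intro s
    rw [PySem.List.enumerate_cons]
    simp only [List.any_cons, ih, List.mem_cons]
    by_cases hx : l = x
    · simp [hx]
    · have hx' : x ≠ l := fun e => hx e.symm
      simp [hx, hx']

theorem contains_mkS2I (u : List String) (l : String) :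
    (mkS2I u).contains l = decide (l ∈ u) := by
  simp only [mkS2I, PySem.Dict.contains, List.any_map, Function.comp_def]
  exact any_snd_enumerate u l 0

theorem update_prefix (ls : List String) : ∀ (u : List String),
    ∃ t, PySem.Set.update u ls = u ++ t := by
  induction ls with
  | nil => exact fun u => ⟨[], by simp [PySem.Set.update]⟩
  | cons l ls ih =>
    intro u
    rw [show PySem.Set.update u (l :: ls) = PySem.Set.update (PySem.Set.add u l) ls from rfl]
    rcases ih (PySem.Set.add u l) with ⟨t, ht⟩
    by_cases h : l ∈ u
    · exact ⟨t, by rw [set_add_mem u l h] at ht ⊢; exact ht⟩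
    · refine ⟨[l] ++ t, ?_⟩
      rw [set_add_not_mem u l h] at ht ⊢
      simpa [List.append_assoc] using ht

theorem update_nodup (ls : List String) : ∀ (u : List String), u.Nodup →
    (PySem.Set.update u ls).Nodup := by
  induction ls with
  | nil => exact fun u hu => by simpa [PySem.Set.update] using hu
  | cons l ls ih =>
    intro u hu
    rw [show PySem.Set.update u (l :: ls) = PySem.Set.update (PySem.Set.add u l) ls from rfl]
    apply ih
    by_cases h : l ∈ u
    · rwa [set_add_mem u l h]
    · rw [set_add_not_mem u l h, List.nodup_append]
      refine ⟨hu, List.nodup_singleton l, ?_⟩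
      intro a ha b hb
      rw [List.mem_singleton] at hb
      subst hb
      exact fun e => h (e ▸ ha)

theorem getD_mkS2I_append (u t : List String) (l : String) (h : l ∈ u) :
    (mkS2I (u ++ t)).getD l 0 = (mkS2I u).getD l 0 := by
  have hsome : (((PySem.List.enumerate u 0).map (fun p => (p.2, p.1))).find?
      (fun p : String × Int => p.1 == l)).isSome = true := by
    rw [List.find?_isSome]
    have hc : (mkS2I u).contains l = true := by rw [contains_mkS2I]; simpa using h
    simp only [mkS2I, PySem.Dict.contains, List.any_eq_true] at hc
    exact hc
  rcases Option.isSome_iff_exists.mp hsome with ⟨v, hv⟩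
  simp only [mkS2I, PySem.Dict.getD, PySem.Dict.get?, PySem.List.enumerate_append,
    List.map_append, List.find?_append, hv, Option.some_or]

theorem size_mkI2S (u : List String) : (mkI2S u).size = u.length := by
  simp [mkI2S, PySem.Dict.size, PySem.List.length_enumerate]

theorem contains_mkI2S_len (u : List String) :
    (mkI2S u).contains ((u.length : Int)) = false := by
  simp only [mkI2S, PySem.Dict.contains]
  rw [List.any_eq_false]
  intro p hp
  rcases (PySem.List.mem_enumerate_iff u 0 p).mp hp with ⟨k, hk, rfl⟩
  simp; omega

theorem insert_mkI2S (u : List String) (l : String) :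
    (mkI2S u).insert ((mkI2S u).size : Int) l = mkI2S (u ++ [l]) := by
  rw [size_mkI2S]
  apply PySem.Dict.ext
  rw [PySem.Dict.items_insert_of_not_contains _ _ (contains_mkI2S_len u)]
  simp [mkI2S, PySem.List.enumerate_append, PySem.List.enumerate_cons,
    PySem.List.enumerate_nil]

theorem insert_mkS2I (u : List String) (l : String) (h : l ∉ u) :
    (mkS2I u).insert l ((mkI2S u).size : Int) = mkS2I (u ++ [l]) := by
  have hc : (mkS2I u).contains l = false := by rw [contains_mkS2I]; simpa using h
  apply PySem.Dict.ext
  rw [PySem.Dict.items_insert_of_not_contains _ _ hc, size_mkI2S]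
  simp [mkS2I, PySem.List.enumerate_append, PySem.List.enumerate_cons,
    PySem.List.enumerate_nil]

theorem loopA (ls : List String) : ∀ (u : List String) (acc : List Int) (s : Int), u.Nodup →
    (PySem.List.enumerate ls s).foldl pvStepA (mkI2S u, mkS2I u, acc)
      = (mkI2S (PySem.Set.update u ls), mkS2I (PySem.Set.update u ls),
         acc ++ ls.map (fun l => (mkS2I (PySem.Set.update u ls)).getD l 0)) := by
  induction ls with
  | nil => intro u acc s _; simp [PySem.List.enumerate_nil, PySem.Set.update]
  | cons l ls ih =>
    intro u acc s hu
    rw [PySem.List.enumerate_cons, List.foldl_cons,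
      show PySem.Set.update u (l :: ls) = PySem.Set.update (PySem.Set.add u l) ls from rfl]
    by_cases h : l ∈ u
    · have hstep : pvStepA (mkI2S u, mkS2I u, acc) (s, l)
          = (mkI2S u, mkS2I u, acc ++ [(mkS2I u).getD l 0]) := by
        simp only [pvStepA, contains_mkS2I]
        rw [if_neg (by simp [h])]
      rw [hstep, set_add_mem u l h, ih u _ (s + 1) hu]
      rcases update_prefix ls u with ⟨t, ht⟩
      rw [List.map_cons, ht, getD_mkS2I_append u t l h]
      simp
    · have hstep : pvStepA (mkI2S u, mkS2I u, acc) (s, l)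
          = (mkI2S (u ++ [l]), mkS2I (u ++ [l]), acc ++ [(mkS2I (u ++ [l])).getD l 0]) := by
        simp only [pvStepA, contains_mkS2I]
        rw [if_pos (by simp [h])]
        rw [insert_mkS2I u l h, insert_mkI2S u l]
      have hnd : (u ++ [l]).Nodup := by
        rw [List.nodup_append]
        refine ⟨hu, List.nodup_singleton l, ?_⟩
        intro a ha b hb
        rw [List.mem_singleton] at hb
        subst hb
        exact fun e => h (e ▸ ha)
      rw [hstep, set_add_not_mem u l h, ih (u ++ [l]) _ (s + 1) hnd]
      rcases update_prefix ls (u ++ [l]) with ⟨t, ht⟩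
      rw [List.map_cons, ht, getD_mkS2I_append (u ++ [l]) t l (by simp)]
      simp

theorem alt_s2i (U : List String) (hU : U.Nodup) :
    PySem.Dict.ofList ((PySem.List.enumerate U).map (fun p => (p.2, p.1))) = mkS2I U := by
  apply PySem.Dict.ext
  have hkeys : (((PySem.List.enumerate U).map (fun p : Int × String => (p.2, p.1))).map
      (fun a => a.1)).Nodup := by
    rw [List.map_map,
      show ((fun a : String × Int => a.1) ∘ (fun p : Int × String => (p.2, p.1)))
        = (fun p : Int × String => p.2) from rfl,
      PySem.List.map_snd_enumerate]
    exact hU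
  have hfresh := PySem.Dict.items_foldl_insert_fresh
      ((PySem.List.enumerate U).map (fun p : Int × String => (p.2, p.1)))
      (fun a => a.1) (fun a => a.2) PySem.Dict.empty
      (fun a _ => by simp [PySem.Dict.contains, PySem.Dict.empty]) hkeys
  simpa [mkS2I, PySem.Dict.empty, PySem.Dict.ofList, PySem.Dict.update] using hfresh

theorem alt_i2s (U : List String) :
    (PySem.Dict.ofList (PySem.List.enumerate U)).items = PySem.List.enumerate U := by
  have hkeys : ((PySem.List.enumerate U).map (fun a : Int × String => a.1)).Nodup := by
    have hp := PySem.List.pairwise_lt_enumerate U 0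
    have hm : ((PySem.List.enumerate U 0).map (fun a : Int × String => a.1)).Pairwise
        ((· < ·) : Int → Int → Prop) := List.Pairwise.map _ (fun a b hab => hab) hp
    exact List.Pairwise.imp ne_of_lt hm
  have hfresh := PySem.Dict.items_foldl_insert_fresh
      (PySem.List.enumerate U) (fun a => a.1) (fun a => a.2) PySem.Dict.empty
      (fun a _ => by simp [PySem.Dict.contains, PySem.Dict.empty]) hkeys
  simpa [PySem.Dict.empty, PySem.Dict.ofList, PySem.Dict.update] using hfresh

-- ===== VERDICT (by name: the statement is the Claim_ definition above) =====
theorem convert_labels_string_to_int_spec : Claim_equal_convert_labels_string_to_int := by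
  intro labels _
  unfold Spec_convert_labels_string_to_int convert_labels_string_to_int convert_labels_string_to_int_alt
  have h0 : (PySem.Dict.empty, PySem.Dict.empty, ([] : List Int))
      = (mkI2S [], mkS2I [], ([] : List Int)) := by
    simp [mkI2S, mkS2I, PySem.Dict.empty, PySem.List.enumerate_nil]
  have hU : PySem.List.dedup labels = PySem.Set.update [] labels := rfl
  have hnd : (PySem.Set.update [] labels).Nodup := update_nodup labels [] (by simp)
  rw [h0, loopA labels [] [] 0 (by simp)]
  simp only [List.nil_append]
  rw [hU, alt_s2i _ hnd, alt_i2s]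
  rfl
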